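-- pv_equiv track=rewrite | github.com/quantumlib/OpenFermion | src/openfermion/ops/_majorana_operator.py | _sort_majorana_term
-- ===== SOURCE A (Python) =====
-- def _sort_majorana_term(term):
--     """Sort a Majorana term.
--
--     Args:
--         term (Tuple[int]): The indices of a Majorana operator term
--
--     Returns:
--         Tuple[Tuple[int], int]. The first object returned is a sorted list
--         representing the indices acted upon. The second object is the parity
--         of the term. A parity of 1 indicates that the term should include
--         a minus sign.
--     """
--     if len(term) < 2:
--         return term, 0
--     center = len(term) // 2
--     left_term, left_parity = _sort_majorana_term(term[:center])
--     right_term, right_parity = _sort_majorana_term(term[center:])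
--     merged_term, merge_parity = _merge_majorana_terms(left_term, right_term)
--     return merged_term, (left_parity + right_parity + merge_parity) % 2
--
-- def _merge_majorana_terms(left_term, right_term):
--     """Merge two Majorana terms.
--
--     Args:
--         left_term (Tuple[int]): The left-hand term
--         right_term (Tuple[int]): The right-hand term
--
--     Returns:
--         Tuple[Tuple[int], int]. The first object returned is a sorted list
--         representing the indices acted upon. The second object is the parity
--         of the term. A parity of 1 indicates that the term should include
--         a minus sign.
--     """
--     merged_term = []
--     parity = 0
--     i, j = 0, 0
--     while i < len(left_term) and j < len(right_term):
--         if left_term[i] < right_term[j]: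
--             merged_term.append(left_term[i])
--             i += 1
--         elif left_term[i] > right_term[j]:
--             merged_term.append(right_term[j])
--             j += 1
--             parity += len(left_term) - i
--         else:
--             parity += len(left_term) - i - 1
--             i += 1
--             j += 1
--     if i == len(left_term):
--         merged_term.extend(right_term[j:])
--     else:
--         merged_term.extend(left_term[i:])
--     return tuple(merged_term), parity % 2
-- ===== SOURCE B (Python) =====
-- def _sort_majorana_term(term):
--     """Normal-order a Majorana term by a single incremental insertion pass.
--
--     Keeps a running sorted, duplicate-free list and a parity counter;
--     each index is inserted at its sorted position (each strictly greater
--     element already present flips the parity), and an equal element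
--     annihilates with it instead of being inserted.
--     """
--     result = []
--     parity = 0
--     for x in term:
--         new = []
--         k = 0
--         while k < len(result) and result[k] < x:
--             new.append(result[k])
--             k += 1
--         if k < len(result) and result[k] == x:
--             new.extend(result[k + 1:])
--             parity += len(result) - k - 1
--         else:
--             new.append(x)
--             new.extend(result[k:])
--             parity += len(result) - k
--         result = new
--     return tuple(result), parity % 2
-- ===== Notes on version B (the rewrite author's own statement) =====
-- stated objective: simpler
-- what changed: Replaced the recursive divide-and-conquer merge-sort with pairwise cancellation by a single incremental pass that inserts each index into a running sorted duplicate-free list, annihilating equal pairs and counting passed strictly-greater elements for the parity.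
import Mathlib
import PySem

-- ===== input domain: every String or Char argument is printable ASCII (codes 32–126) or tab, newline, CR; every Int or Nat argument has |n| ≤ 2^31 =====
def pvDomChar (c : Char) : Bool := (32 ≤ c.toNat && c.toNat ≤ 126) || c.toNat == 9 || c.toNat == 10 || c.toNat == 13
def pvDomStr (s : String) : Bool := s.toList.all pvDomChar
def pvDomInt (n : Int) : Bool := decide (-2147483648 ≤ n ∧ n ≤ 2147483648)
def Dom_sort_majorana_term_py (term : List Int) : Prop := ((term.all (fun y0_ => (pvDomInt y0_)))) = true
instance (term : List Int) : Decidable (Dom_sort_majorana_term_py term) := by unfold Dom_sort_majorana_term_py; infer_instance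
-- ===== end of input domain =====

-- B replaces A's recursive merge-sort normal ordering by a single incremental
-- insertion pass (simpler: one loop, no recursion, no merge helper).

-- ===== PORT A =====
-- while-loop of _merge_majorana_terms as recursion on the two remaining suffixes;
-- parity is accumulated exactly as Python does (len(left)-i = length of the left suffix).
def pvMergeAux : List Int → List Int → List Int × Int
  | [], r => (r, 0)
  | a :: as, [] => (a :: as, 0)
  | a :: as, b :: bs =>
    if a < b then
      let m := pvMergeAux as (b :: bs)
      (a :: m.1, m.2)
    else if b < a then
      let m := pvMergeAux (a :: as) bs
      (b :: m.1, m.2 + ((as.length : Int) + 1))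
    else
      let m := pvMergeAux as bs
      (m.1, m.2 + (as.length : Int))
termination_by l r => l.length + r.length
decreasing_by all_goals simp <;> omega

def merge_majorana_terms_py (left_term right_term : List Int) : List Int × Int :=
  let m := pvMergeAux left_term right_term
  (m.1, PySem.Int.mod m.2 2)

def sort_majorana_term_py (term : List Int) : List Int × Int :=
  if term.length < 2 then (term, 0)
  else
    let center := term.length / 2
    let L := sort_majorana_term_py (term.take center)
    let R := sort_majorana_term_py (term.drop center)
    let M := merge_majorana_terms_py L.1 R.1
    (M.1, PySem.Int.mod (L.2 + R.2 + M.2) 2)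
termination_by term.length
decreasing_by all_goals simp <;> omega

-- ===== PORT B =====
-- inner while-loop of Source B: walk the sorted result list copying smaller elements;
-- on an equal element annihilate (drop both, parity += #remaining after it);
-- otherwise insert x (parity += #remaining, all strictly greater).
def pvInsStep (x : Int) : List Int → List Int × Int
  | [] => ([x], 0)
  | y :: ys =>
    if y < x then
      let m := pvInsStep x ys
      (y :: m.1, m.2)
    else if y = x then (ys, (ys.length : Int))
    else (x :: y :: ys, (ys.length : Int) + 1)

def sort_majorana_term_py_alt (term : List Int) : List Int × Int :=
  let st := term.foldl (fun st x =>
    let m := pvInsStep x st.1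
    (m.1, st.2 + m.2)) ([], 0)
  (st.1, PySem.Int.mod st.2 2)

-- ===== PRECONDITION & SPEC =====
def Spec_sort_majorana_term_py (term : List Int) (out : List Int × Int) : Prop := out = sort_majorana_term_py_alt term
instance (term : List Int) (out : List Int × Int) : Decidable (Spec_sort_majorana_term_py term out) := by unfold Spec_sort_majorana_term_py; infer_instance

-- ===== CLAIM (what is proved, stated in full; the proofs are below) =====
def Claim_equal_sort_majorana_term_py : Prop := ∀ (term : List Int), Dom_sort_majorana_term_py term → Spec_sort_majorana_term_py term (sort_majorana_term_py term)

-- ===== LEMMAS AND PROOFS =====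

-- number of inversion pairs (i < j with t[i] > t[j]) of a list
def pvInv : List Int → Nat
  | [] => 0
  | x :: xs => xs.countP (fun y => decide (y < x)) + pvInv xs

-- number of cross pairs (a ∈ l, b ∈ r with b < a)
def pvCross (l : List Int) : List Int → Nat
  | [] => 0
  | b :: bs => l.countP (fun a => decide (b < a)) + pvCross l bs

-- x occurs an odd number of times in t
def pvOdd (t : List Int) (x : Int) : Prop := t.count x % 2 = 1

def pvSumf (f : Int → Nat) (l : List Int) : Nat := (l.map f).sum

lemma pvCross_nil_left (r : List Int) : pvCross [] r = 0 := by
  induction r with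
  | nil => rfl
  | cons b bs ih => simp [pvCross, ih]

lemma pvCross_cons_left (a : Int) (as r : List Int) :
    pvCross (a :: as) r = r.countP (fun b => decide (b < a)) + pvCross as r := by
  induction r with
  | nil => simp [pvCross]
  | cons b bs ih => simp [pvCross, ih, List.countP_cons]; omega

lemma pvInv_append (l r : List Int) : pvInv (l ++ r) = pvInv l + pvInv r + pvCross l r := by
  induction l with
  | nil => simp [pvInv, pvCross_nil_left]
  | cons a as ih =>
      simp only [List.cons_append, pvInv, List.countP_append, ih, pvCross_cons_left]
      omega

lemma pvCross_eq_sumf (l r : List Int) :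
    pvCross l r = pvSumf (fun b => l.countP (fun a => decide (b < a))) r := by
  induction r with
  | nil => rfl
  | cons b bs ih => simp [pvCross, pvSumf, ih]

-- odd-multiplicity transfer: a duplicate-free list with the same odd-count support
-- has, modulo 2, the same f-sum as the original list
lemma pvTransfer (f : Int → Nat) :
    ∀ (t s : List Int), s.Nodup → (∀ x, x ∈ s ↔ pvOdd t x) →
      pvSumf f s % 2 = pvSumf f t % 2 := by
  intro t
  induction t with
  | nil =>
      intro s hnd hmem
      have : s = [] := by
        apply List.eq_nil_iff_forall_not_mem.2
        intro x hx
        have := (hmem x).1 hx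
        simp [pvOdd] at this
      simp [this]
  | cons a t' ih =>
      intro s hnd hmem
      by_cases ha : a ∈ s
      · have hperm : s.Perm (a :: s.erase a) := List.perm_cons_erase ha
        have hnd' : (s.erase a).Nodup := hnd.erase a
        have hmem' : ∀ x, x ∈ s.erase a ↔ pvOdd t' x := by
          intro x
          rw [List.Nodup.mem_erase_iff hnd]
          by_cases hx : x = a
          · subst hx
            have h1 := (hmem x).1 ha
            simp [pvOdd, List.count_cons_self] at h1 ⊢
            omega
          · have h2 := hmem x
            simp [pvOdd, List.count_cons, hx, Ne.symm hx] at h2 ⊢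
            tauto
        have h3 := ih (s.erase a) hnd' hmem'
        have h4 : pvSumf f s = f a + pvSumf f (s.erase a) := by
          simp [pvSumf, (hperm.map f).sum_eq]
        simp only [pvSumf, List.map_cons, List.sum_cons] at h4 ⊢
        simp only [pvSumf] at h3
        omega
      · have hnd' : (a :: s).Nodup := List.nodup_cons.2 ⟨ha, hnd⟩
        have hmem' : ∀ x, x ∈ (a :: s) ↔ pvOdd t' x := by
          intro x
          by_cases hx : x = a
          · subst hx
            have h1 : ¬ pvOdd (x :: t') x := fun h => ha ((hmem x).2 h)
            simp [pvOdd, List.count_cons_self] at h1 ⊢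
            omega
          · have h2 := hmem x
            simp [pvOdd, List.count_cons, hx, Ne.symm hx] at h2 ⊢
            tauto
        have h3 := ih (a :: s) hnd' hmem'
        simp only [pvSumf, List.map_cons, List.sum_cons] at h3 ⊢
        omega

lemma pvCountP_eq_sumf (P : Int → Bool) (l : List Int) :
    l.countP P = pvSumf (fun x => if P x then 1 else 0) l := by
  induction l with
  | nil => rfl
  | cons x xs ih => simp [List.countP_cons, pvSumf, ih]; omega

lemma pvCountP_transfer (P : Int → Bool) (t s : List Int) (hnd : s.Nodup)
    (hmem : ∀ x, x ∈ s ↔ pvOdd t x) : s.countP P % 2 = t.countP P % 2 := by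
  rw [pvCountP_eq_sumf, pvCountP_eq_sumf]
  exact pvTransfer _ t s hnd hmem

lemma pvCross_left_transfer (t s r : List Int) (hnd : s.Nodup)
    (hmem : ∀ x, x ∈ s ↔ pvOdd t x) : pvCross s r % 2 = pvCross t r % 2 := by
  induction r with
  | nil => rfl
  | cons b bs ih =>
      have := pvCountP_transfer (fun a => decide (b < a)) t s hnd hmem
      simp only [pvCross]
      omega

lemma pvCross_right_transfer (l t s : List Int) (hnd : s.Nodup)
    (hmem : ∀ x, x ∈ s ↔ pvOdd t x) : pvCross l s % 2 = pvCross l t % 2 := by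
  rw [pvCross_eq_sumf, pvCross_eq_sumf]
  exact pvTransfer _ t s hnd hmem

lemma pvNodup_of_pairwise {l : List Int} (h : l.Pairwise (· < ·)) : l.Nodup :=
  h.imp fun h => ne_of_lt h

-- merge characterisation: on sorted duplicate-free inputs, the merged list is the
-- sorted symmetric difference and the accumulated parity is exactly the cross count
lemma pvMergeAux_spec : ∀ l r : List Int,
    l.Pairwise (· < ·) → r.Pairwise (· < ·) →
    (pvMergeAux l r).1.Pairwise (· < ·) ∧
    (∀ x, x ∈ (pvMergeAux l r).1 ↔ ((x ∈ l ∧ x ∉ r) ∨ (x ∈ r ∧ x ∉ l))) ∧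
    (pvMergeAux l r).2 = (pvCross l r : Int) := by
  intro l r
  induction l, r using pvMergeAux.induct with
  | case1 r =>
      intro _ hr
      simp only [pvMergeAux, pvCross_nil_left]
      refine ⟨hr, ?_, by simp⟩
      intro x; simp
  | case2 a as =>
      intro hl _
      simp only [pvMergeAux, pvCross]
      refine ⟨hl, ?_, by simp⟩
      intro x; simp
  | case3 a as b bs h ih =>
      intro hl hr
      obtain ⟨hla, hl'⟩ := List.pairwise_cons.1 hl
      obtain ⟨ih1, ih2, ih3⟩ := ih hl' hr
      have haux : ∀ z ∈ (b :: bs), a < z := by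
        intro z hz
        rcases List.mem_cons.1 hz with hz | hz
        · omega
        · exact lt_trans h ((List.pairwise_cons.1 hr).1 z hz)
      simp only [pvMergeAux, if_pos h]
      refine ⟨?_, ?_, ?_⟩
      · refine List.pairwise_cons.2 ⟨?_, ih1⟩
        intro z hz
        rcases ((ih2 z).1 hz) with ⟨hz1, _⟩ | ⟨hz1, _⟩
        · exact hla z hz1
        · exact haux z hz1
      · intro x
        by_cases hx : x = a
        · subst hx
          have h1 : x ∉ (b :: bs) := fun hc => absurd (haux x hc) (lt_irrefl x)
          have h2 : x ∉ as := fun hc => absurd (hla x hc) (lt_irrefl x)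
          simp [ih2 x, h1, h2]
        · simp [List.mem_cons, ih2 x, hx]
      · rw [pvCross_cons_left]
        have hz : (b :: bs).countP (fun z => decide (z < a)) = 0 := by
          apply List.countP_eq_zero.2
          intro z hz
          simpa using not_lt.2 (le_of_lt (haux z hz))
        rw [hz]
        simpa using ih3
  | case4 a as b bs h h2 ih =>
      intro hl hr
      obtain ⟨hrb, hr'⟩ := List.pairwise_cons.1 hr
      obtain ⟨ih1, ih2, ih3⟩ := ih hl hr'
      have haux : ∀ z ∈ (a :: as), b < z := by
        intro z hz
        rcases List.mem_cons.1 hz with hz | hz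
        · omega
        · exact lt_trans h2 ((List.pairwise_cons.1 hl).1 z hz)
      simp only [pvMergeAux, if_neg h, if_pos h2]
      refine ⟨?_, ?_, ?_⟩
      · refine List.pairwise_cons.2 ⟨?_, ih1⟩
        intro z hz
        rcases ((ih2 z).1 hz) with ⟨hz1, _⟩ | ⟨hz1, _⟩
        · exact haux z hz1
        · exact hrb z hz1
      · intro x
        by_cases hx : x = b
        · subst hx
          have h1 : x ∉ (a :: as) := fun hc => absurd (haux x hc) (lt_irrefl x)
          have h3 : x ∉ bs := fun hc => absurd (hrb x hc) (lt_irrefl x)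
          simp [ih2 x, h1, h3]
        · simp [List.mem_cons, ih2 x, hx]
      · have hc : (a :: as).countP (fun z => decide (b < z)) = (a :: as).length := by
          apply List.countP_eq_length.2
          intro z hz
          simpa using haux z hz
        simp only [pvCross, hc, ih3]
        simp
        push_cast
        ring
  | case5 a as b bs h h2 ih =>
      intro hl hr
      have hab : a = b := by omega
      subst hab
      obtain ⟨hla, hl'⟩ := List.pairwise_cons.1 hl
      obtain ⟨hrb, hr'⟩ := List.pairwise_cons.1 hr
      obtain ⟨ih1, ih2, ih3⟩ := ih hl' hr'
      have hnas : a ∉ as := fun hc => absurd (hla a hc) (lt_irrefl a)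
      have hnbs : a ∉ bs := fun hc => absurd (hrb a hc) (lt_irrefl a)
      simp only [pvMergeAux, if_neg h, if_neg h2]
      refine ⟨ih1, ?_, ?_⟩
      · intro x
        by_cases hx : x = a
        · subst hx
          simp [ih2 x, hnas, hnbs]
        · simp [List.mem_cons, ih2 x, hx]
      · have hc1 : (a :: as).countP (fun z => decide (a < z)) = as.length := by
          simp only [List.countP_cons]
          have : as.countP (fun z => decide (a < z)) = as.length :=
            List.countP_eq_length.2 fun z hz => by simpa using hla z hz
          simp [this]
        have hc2 : bs.countP (fun z => decide (z < a)) = 0 :=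
          List.countP_eq_zero.2 fun z hz => by simpa using not_lt.2 (le_of_lt (hrb z hz))
        simp only [pvCross, hc1, pvCross_cons_left, hc2, ih3]
        push_cast
        ring

-- A computes: sorted odd-multiplicity support, inversion parity
lemma pvA_spec_aux : ∀ n, ∀ t : List Int, t.length ≤ n →
    (sort_majorana_term_py t).1.Pairwise (· < ·) ∧
    (∀ x, x ∈ (sort_majorana_term_py t).1 ↔ pvOdd t x) ∧
    (sort_majorana_term_py t).2 = ((pvInv t % 2 : Nat) : Int) := by
  intro n
  induction n with
  | zero =>
      intro t ht
      have : t = [] := List.length_eq_zero_iff.1 (Nat.le_zero.1 ht)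
      subst this
      rw [sort_majorana_term_py]
      simp [pvOdd, pvInv]
  | succ n ih =>
      intro t ht
      by_cases h2 : t.length < 2
      · rcases t with _ | ⟨a, _ | ⟨b, t'⟩⟩
        · rw [sort_majorana_term_py]; simp [pvOdd, pvInv]
        · rw [sort_majorana_term_py]
          simp [pvOdd, pvInv, List.count_cons]
          intro x
          by_cases hx : x = a
          · simp [hx]
          · simp [hx, Ne.symm hx]
        · simp at h2
      · rw [sort_majorana_term_py]
        simp only [if_neg h2]
        have hc1 : (t.take (t.length / 2)).length ≤ n := by simp; omega
        have hc2 : (t.drop (t.length / 2)).length ≤ n := by simp; omega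
        obtain ⟨l1, l2, l3⟩ := ih _ hc1
        obtain ⟨r1, r2, r3⟩ := ih _ hc2
        obtain ⟨m1, m2, m3⟩ := pvMergeAux_spec _ _ l1 r1
        have hsplit : t.take (t.length / 2) ++ t.drop (t.length / 2) = t :=
          List.take_append_drop _ t
        refine ⟨m1, ?_, ?_⟩
        · intro x
          rw [merge_majorana_terms_py]
          have hcnt : t.count x = (t.take (t.length / 2)).count x + (t.drop (t.length / 2)).count x := by
            conv_lhs => rw [← hsplit]
            exact List.count_append ..
          simp only [m2 x, l2 x, r2 x, pvOdd, hcnt]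
          constructor
          · rintro (⟨hx1, hx2⟩ | ⟨hx1, hx2⟩) <;> omega
          · intro hx
            by_cases hx1 : (t.take (t.length / 2)).count x % 2 = 1
            · left; constructor; · exact hx1
              omega
            · right; constructor; · omega
              omega
        · rw [merge_majorana_terms_py]
          have hinv : pvInv t = pvInv (t.take (t.length / 2)) + pvInv (t.drop (t.length / 2))
              + pvCross (t.take (t.length / 2)) (t.drop (t.length / 2)) := by
            conv_lhs => rw [← hsplit]
            exact pvInv_append ..
          have hx1 : pvCross (sort_majorana_term_py (t.take (t.length / 2))).1
              (sort_majorana_term_py (t.drop (t.length / 2))).1 % 2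
              = pvCross (t.take (t.length / 2)) (t.drop (t.length / 2)) % 2 := by
            rw [pvCross_left_transfer _ _ _ (pvNodup_of_pairwise l1) l2]
            exact pvCross_right_transfer _ _ _ (pvNodup_of_pairwise r1) r2
          rw [PySem.Int.mod_eq_emod_of_pos (by norm_num), PySem.Int.mod_eq_emod_of_pos (by norm_num)]
          simp only [l3, r3, m3, hinv]
          push_cast
          omega

-- B's inner step characterisation
lemma pvInsStep_spec (x : Int) : ∀ s : List Int, s.Pairwise (· < ·) →
    (pvInsStep x s).1.Pairwise (· < ·) ∧
    (∀ y, y ∈ (pvInsStep x s).1 ↔ ((y = x ∧ y ∉ s) ∨ (y ∈ s ∧ y ≠ x))) ∧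
    (pvInsStep x s).2 = (s.countP (fun y => decide (x < y)) : Int) := by
  intro s
  induction s with
  | nil =>
      intro _
      simp [pvInsStep]
  | cons y ys ih =>
      intro hs
      obtain ⟨hy, hs'⟩ := List.pairwise_cons.1 hs
      by_cases h1 : y < x
      · obtain ⟨ih1, ih2, ih3⟩ := ih hs'
        simp only [pvInsStep, if_pos h1]
        refine ⟨?_, ?_, ?_⟩
        · refine List.pairwise_cons.2 ⟨?_, ih1⟩
          intro z hz
          rcases (ih2 z).1 hz with ⟨hz1, _⟩ | ⟨hz1, _⟩
          · omega
          · exact hy z hz1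
        · intro t
          by_cases hty : t = y
          · subst hty
            have htx : t ≠ x := by omega
            simp [ih2 t, htx]
          · by_cases htx : t = x
            · subst htx
              have : t ∉ [y] := by simp; omega
              simp [ih2 t, hty]
            · simp [ih2 t, hty, htx]
        · rw [ih3]
          have : ¬ x < y := by omega
          simp [List.countP_cons, this]
      · by_cases h2 : y = x
        · subst h2
          simp only [pvInsStep, if_neg h1, if_pos rfl]
          have hny : y ∉ ys := fun hc => absurd (hy y hc) (lt_irrefl y)
          refine ⟨hs', ?_, ?_⟩
          · intro t
            by_cases ht : t = y
            · subst ht; simp [hny]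
            · simp [ht]
          · have : ys.countP (fun z => decide (y < z)) = ys.length :=
              List.countP_eq_length.2 fun z hz => by simpa using hy z hz
            simp [List.countP_cons, this]
        · have hxy : x < y := by omega
          simp only [pvInsStep, if_neg h1, if_neg h2]
          have hnx : x ∉ (y :: ys) := by
            intro hc
            rcases List.mem_cons.1 hc with hc | hc
            · omega
            · exact absurd (lt_trans hxy (hy x hc)) (lt_irrefl x)
          refine ⟨?_, ?_, ?_⟩
          · refine List.pairwise_cons.2 ⟨?_, hs⟩
            intro z hz
            rcases List.mem_cons.1 hz with hz | hz
            · omega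
            · exact lt_trans hxy (hy z hz)
          · intro t
            by_cases ht : t = x
            · subst ht; simp [hnx]
            · simp [ht]
          · have : ys.countP (fun z => decide (x < z)) = ys.length :=
              List.countP_eq_length.2 fun z hz => by simpa using lt_trans hxy (hy z hz)
            simp [this, hxy]

-- B's fold invariant
lemma pvB_fold : ∀ t : List Int,
    (t.foldl (fun st x => let m := pvInsStep x st.1; (m.1, st.2 + m.2)) (([], 0) : List Int × Int)).1.Pairwise (· < ·) ∧
    (∀ x, x ∈ (t.foldl (fun st x => let m := pvInsStep x st.1; (m.1, st.2 + m.2)) (([], 0) : List Int × Int)).1 ↔ pvOdd t x) ∧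
    ∃ n : Nat, (t.foldl (fun st x => let m := pvInsStep x st.1; (m.1, st.2 + m.2)) (([], 0) : List Int × Int)).2 = (n : Int) ∧
      n % 2 = pvInv t % 2 := by
  intro t
  induction t using List.reverseRecOn with
  | nil =>
      refine ⟨by simp, ?_, 0, by simp, by simp [pvInv]⟩
      intro x; simp [pvOdd]
  | append_singleton t' x ih =>
      obtain ⟨ih1, ih2, n, ihn, ihm⟩ := ih
      rw [List.foldl_append]
      simp only [List.foldl_cons, List.foldl_nil]
      obtain ⟨s1, s2, s3⟩ := pvInsStep_spec x _ ih1
      refine ⟨s1, ?_, ?_⟩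
      · intro y
        have hodd : y ∈ (t'.foldl (fun st x => let m := pvInsStep x st.1; (m.1, st.2 + m.2)) (([], 0) : List Int × Int)).1 ↔ t'.count y % 2 = 1 := ih2 y
        rw [s2 y]
        by_cases hy : y = x
        · subst hy
          have hgoal : pvOdd (t' ++ [y]) y ↔ (t'.count y + 1) % 2 = 1 := by
            simp [pvOdd, List.count_append]
          constructor
          · rintro (⟨-, h⟩ | ⟨-, h⟩)
            · have hc0 : ¬ t'.count y % 2 = 1 := fun hc => h (hodd.2 hc)
              exact hgoal.2 (by omega)
            · exact absurd rfl h
          · intro h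
            left
            refine ⟨rfl, fun hc => ?_⟩
            have h1 := hodd.1 hc
            rw [hgoal] at h
            omega
        · have hgoal : pvOdd (t' ++ [x]) y ↔ t'.count y % 2 = 1 := by
            simp [pvOdd, List.count_append, Ne.symm hy]
          constructor
          · rintro (⟨h1, -⟩ | ⟨h1, -⟩)
            · exact absurd h1 hy
            · exact hgoal.2 (hodd.1 h1)
          · intro h
            right
            exact ⟨hodd.2 (hgoal.1 h), hy⟩
      · refine ⟨n + (t'.foldl (fun st x => let m := pvInsStep x st.1; (m.1, st.2 + m.2)) (([], 0) : List Int × Int)).1.countP (fun y => decide (x < y)), ?_, ?_⟩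
        · rw [ihn, s3]; push_cast; ring
        · have htrans := pvCountP_transfer (fun y => decide (x < y)) t' _ (pvNodup_of_pairwise ih1) ih2
          have hinv : pvInv (t' ++ [x]) = pvInv t' + t'.countP (fun y => decide (x < y)) := by
            rw [pvInv_append]
            simp [pvInv, pvCross]
          omega

lemma pvSortedExt (l₁ l₂ : List Int) (h₁ : l₁.Pairwise (· < ·)) (h₂ : l₂.Pairwise (· < ·))
    (hmem : ∀ x, x ∈ l₁ ↔ x ∈ l₂) : l₁ = l₂ :=
  ((List.perm_ext_iff_of_nodup (pvNodup_of_pairwise h₁) (pvNodup_of_pairwise h₂)).2 hmem).eq_of_pairwise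
    (fun _ _ _ _ h h' => absurd h' (lt_asymm h)) h₁ h₂

-- ===== VERDICT (by name: the statement is the Claim_ definition above) =====
theorem sort_majorana_term_py_spec : Claim_equal_sort_majorana_term_py := by
  intro term _
  unfold Spec_sort_majorana_term_py
  obtain ⟨hA1, hA2, hA3⟩ := pvA_spec_aux term.length term le_rfl
  obtain ⟨hB1, hB2, hB3⟩ := pvB_fold term
  obtain ⟨n, hn, hmod⟩ := hB3
  unfold sort_majorana_term_py_alt
  refine Prod.ext ?_ ?_
  · exact pvSortedExt _ _ hA1 hB1 (fun x => (hA2 x).trans (hB2 x).symm)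
  · show (sort_majorana_term_py term).2 = PySem.Int.mod _ 2
    rw [hA3, hn, PySem.Int.mod_eq_emod_of_pos (by norm_num)]
    push_cast
    omega
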